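-- pv_equiv track=rewrite | github.com/valentinogirini/ayed1-2025-tps | TP4/ejercicio7.py | eliminar_subcadena_b
-- ===== SOURCE A (Python) =====
-- def eliminar_subcadena_b(cadena: str, inicio: int, cantidad: int) -> str:
--     """
--     Elimina una subcadena sin usar rebanadas, mediante un ciclo.
--
--     Precondición:
--     - cadena es una cadena no vacía ni compuesta solo por espacios.
--     - inicio es un entero >= 1 y <= longitud de la cadena.
--     - cantidad es un entero > 0 y no excede los caracteres disponibles desde 'inicio'.
--
--     Postcondición: retorna la cadena resultante tras eliminar la subcadena.
--     """
--     resultado = ""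
--     inicio -= 1
--     fin = inicio + cantidad
--
--     for i, c in enumerate(cadena):
--         if i < inicio or i >= fin:
--             resultado += c
--
--     return resultado
-- ===== SOURCE B (Python) =====
-- def eliminar_subcadena_b(cadena: str, inicio: int, cantidad: int) -> str:
--     """Remove `cantidad` characters starting at 1-based position `inicio`."""
--     corte = inicio - 1
--     return cadena[:corte] + cadena[corte + cantidad:]
-- ===== Notes on version B (the rewrite author's own statement) =====
-- stated objective: simpler
-- what changed: Replaces the enumerate loop with per-character keep/append branches by a single concatenation of two slices; Pre_ admits A's documented domain (inicio >= 1, cantidad >= 0) plus the empty string and windows entirely outside the string (both return cadena unchanged there), and excludes the remaining negative/out-of-range bounds, where A's loop clamps them to 0 while B's Python slicing counts them from the end - both values are accidental.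
-- outside the precondition, e.g. on eliminar_subcadena_b('abc', 0, 2): A returns 'bc', B returns 'abbc'; on eliminar_subcadena_b('abc', 1, -2): A returns 'abc', B returns 'bc'
import Mathlib
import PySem

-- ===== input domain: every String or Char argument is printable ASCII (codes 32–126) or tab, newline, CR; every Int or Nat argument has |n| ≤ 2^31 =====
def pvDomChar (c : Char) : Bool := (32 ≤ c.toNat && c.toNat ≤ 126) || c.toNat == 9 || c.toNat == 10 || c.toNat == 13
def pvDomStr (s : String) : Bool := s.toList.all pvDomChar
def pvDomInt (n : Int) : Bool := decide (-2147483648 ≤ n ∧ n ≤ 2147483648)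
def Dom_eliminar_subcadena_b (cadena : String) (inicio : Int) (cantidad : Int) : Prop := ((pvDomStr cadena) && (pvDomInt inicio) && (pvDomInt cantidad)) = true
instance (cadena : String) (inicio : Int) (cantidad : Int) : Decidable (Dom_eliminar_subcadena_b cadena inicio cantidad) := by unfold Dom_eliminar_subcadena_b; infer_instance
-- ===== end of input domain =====

-- B replaces A's character-by-character enumerate loop by the concatenation of two
-- plain slices (objective: simpler).

-- ===== PORT A =====
-- literal port: indexed loop over the characters, appending the kept ones
def eliminar_subcadena_b (cadena : String) (inicio : Int) (cantidad : Int) : String :=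
  let inicio' := inicio - 1
  let fin := inicio' + cantidad
  String.mk ((PySem.List.enumerate cadena.toList 0).foldl
    (fun acc p => if p.1 < inicio' ∨ p.1 ≥ fin then acc ++ [p.2] else acc) ([] : List Char))

-- ===== PORT B =====
-- port of Source B: cadena[:corte] + cadena[corte + cantidad:], Python slice semantics
def eliminar_subcadena_b_alt (cadena : String) (inicio : Int) (cantidad : Int) : String :=
  let corte := inicio - 1
  let l := cadena.toList
  String.mk (PySem.List.slice l none (some corte) ++ PySem.List.slice l (some (corte + cantidad)) none)

-- ===== PRECONDITION & SPEC =====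
-- Pre_ admits A's documented domain (inicio ≥ 1, cantidad ≥ 0), the empty string (both
-- return it), and removal windows lying entirely before the start or entirely past the end
-- (both return cadena unchanged); it excludes the remaining negative/out-of-range bounds,
-- where A's loop clamps them to 0 while B's Python slicing counts them from the end —
-- both values are accidental there.
def Pre_eliminar_subcadena_b (cadena : String) (inicio : Int) (cantidad : Int) : Prop :=
  (1 ≤ inicio ∧ 0 ≤ cantidad)
  ∨ cadena.toList = []
  ∨ (inicio - 1 + (cadena.toList.length : Int) ≤ 0 ∧ inicio - 1 + cantidad + (cadena.toList.length : Int) ≤ 0)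
  ∨ ((cadena.toList.length : Int) ≤ inicio - 1 ∧ (cadena.toList.length : Int) ≤ inicio - 1 + cantidad)
instance (cadena : String) (inicio : Int) (cantidad : Int) : Decidable (Pre_eliminar_subcadena_b cadena inicio cantidad) := by unfold Pre_eliminar_subcadena_b; infer_instance

def pvWitness_eliminar_subcadena_b : String × Int × Int := ("hola mundo", 3, 4)

def Spec_eliminar_subcadena_b (cadena : String) (inicio : Int) (cantidad : Int) (out : String) : Prop := out = eliminar_subcadena_b_alt cadena inicio cantidad
instance (cadena : String) (inicio : Int) (cantidad : Int) (out : String) : Decidable (Spec_eliminar_subcadena_b cadena inicio cantidad out) := by unfold Spec_eliminar_subcadena_b; infer_instance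

-- ===== CLAIM (what is proved, stated in full; the proofs are below) =====
def Claim_equal_eliminar_subcadena_b : Prop := ∀ (cadena : String) (inicio : Int) (cantidad : Int), Dom_eliminar_subcadena_b cadena inicio cantidad → Pre_eliminar_subcadena_b cadena inicio cantidad → Spec_eliminar_subcadena_b cadena inicio cantidad (eliminar_subcadena_b cadena inicio cantidad)

-- ===== LEMMAS AND PROOFS =====
-- A's indexed keep-loop over indices k, k+1, … with 0 ≤ a ≤ b equals take-then-drop
lemma pv_loop_eq (a b : Int) (hab : a ≤ b) : ∀ (l : List Char) (k : Int) (acc : List Char),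
    List.foldl (fun acc (p : Int × Char) => if p.1 < a ∨ p.1 ≥ b then acc ++ [p.2] else acc) acc
      (PySem.List.enumerate l k)
    = acc ++ l.take (a - k).toNat ++ l.drop (b - k).toNat := by
  intro l
  induction l with
  | nil => intro k acc; simp [PySem.List.enumerate_nil]
  | cons c rest ih =>
    intro k acc
    rw [PySem.List.enumerate_cons, List.foldl_cons]
    by_cases h1 : k < a
    · have ht : (a - k).toNat = (a - (k + 1)).toNat + 1 := by omega
      have hd : (b - k).toNat = (b - (k + 1)).toNat + 1 := by omega
      simp only [if_pos (Or.inl h1), ih (k + 1) (acc ++ [c]), ht, hd,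
        List.take_succ_cons, List.drop_succ_cons]
      simp
    · by_cases h2 : k ≥ b
      · have ht : (a - k).toNat = 0 := by omega
        have hd : (b - k).toNat = 0 := by omega
        have ht' : (a - (k + 1)).toNat = 0 := by omega
        have hd' : (b - (k + 1)).toNat = 0 := by omega
        simp only [if_pos (Or.inr h2), ih (k + 1) (acc ++ [c]), ht, hd, ht', hd',
          List.take_zero, List.drop_zero]
        simp
      · have hcond : ¬(k < a ∨ k ≥ b) := by omega
        have ht : (a - k).toNat = 0 := by omega
        have ht' : (a - (k + 1)).toNat = 0 := by omega
        have hd : (b - k).toNat = (b - (k + 1)).toNat + 1 := by omega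
        simp only [if_neg hcond, ih (k + 1) acc, ht, ht', hd,
          List.take_zero, List.drop_succ_cons]

-- A's loop keeps every character when the window [a, b) misses all the indices
lemma pv_loop_keep_all (a b : Int) : ∀ (l : List Char) (k : Int) (acc : List Char),
    (b ≤ k ∨ k + l.length ≤ a) →
    List.foldl (fun acc (p : Int × Char) => if p.1 < a ∨ p.1 ≥ b then acc ++ [p.2] else acc) acc
      (PySem.List.enumerate l k)
    = acc ++ l := by
  intro l
  induction l with
  | nil => intro k acc _; simp [PySem.List.enumerate_nil]
  | cons c rest ih =>
    intro k acc h
    rw [PySem.List.enumerate_cons, List.foldl_cons]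
    have hcond : k < a ∨ k ≥ b := by
      rcases h with h | h
      · exact Or.inr h
      · exact Or.inl (by simp at h; omega)
    have h' : b ≤ k + 1 ∨ (k + 1) + (rest.length : Int) ≤ a := by
      rcases h with h | h
      · exact Or.inl (by omega)
      · exact Or.inr (by simp at h; omega)
    rw [if_pos hcond, ih (k + 1) (acc ++ [c]) h']
    simp

-- the four clamped-slice shapes Python gives an out-of-range bound
lemma pv_slice_to_low (l : List Char) (b : Int) (h : b + l.length ≤ 0) :
    PySem.List.slice l none (some b) = [] := by
  simp only [PySem.List.slice, PySem.List.clampIdx]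
  split_ifs <;> simp_all <;> omega

lemma pv_slice_to_high (l : List Char) (b : Int) (h : (l.length : Int) ≤ b) :
    PySem.List.slice l none (some b) = l := by
  simp only [PySem.List.slice, PySem.List.clampIdx]
  split_ifs <;> simp_all <;> omega

lemma pv_slice_from_high (l : List Char) (a : Int) (h : (l.length : Int) ≤ a) :
    PySem.List.slice l (some a) none = [] := by
  simp only [PySem.List.slice, PySem.List.clampIdx]
  split_ifs <;> simp_all <;> omega

lemma pv_slice_from_low (l : List Char) (a : Int) (h : a + l.length ≤ 0) :
    PySem.List.slice l (some a) none = l := by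
  rw [PySem.List.slice_some_none]
  have hc : PySem.List.clampIdx l.length a = 0 := by
    simp only [PySem.List.clampIdx]
    split_ifs <;> omega
  simp [hc]

-- ===== VERDICT (by name: the statement is the Claim_ definition above) =====
theorem eliminar_subcadena_b_spec : Claim_equal_eliminar_subcadena_b := by
  intro cadena inicio cantidad _ hpre
  unfold Spec_eliminar_subcadena_b eliminar_subcadena_b eliminar_subcadena_b_alt
  simp only
  rcases hpre with ⟨h1, h2⟩ | hnil | ⟨h1, h2⟩ | ⟨h1, h2⟩
  · rw [pv_loop_eq (inicio - 1) (inicio - 1 + cantidad) (by omega),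
      PySem.List.slice_to _ (by omega), PySem.List.slice_from _ (by omega)]
    simp
  · rw [hnil]
    simp [PySem.List.enumerate_nil, PySem.List.slice]
  · rw [pv_loop_keep_all (inicio - 1) (inicio - 1 + cantidad) _ _ _ (Or.inl (by omega)),
      pv_slice_to_low _ _ (by omega), pv_slice_from_low _ _ (by omega)]
  · rw [pv_loop_keep_all (inicio - 1) (inicio - 1 + cantidad) _ _ _ (Or.inr (by simpa using h1))]
    rw [pv_slice_to_high cadena.toList (inicio - 1) (by omega)]
    rw [pv_slice_from_high cadena.toList (inicio - 1 + cantidad) (by omega)]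
    simp
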